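-- pv_equiv track=rewrite | github.com/huyghea/Audit_LAN | travaux_à_ajouter/dis_temperature.py | _compute_cols
-- ===== SOURCE A (Python) =====
-- def _compute_cols(header_line: str):
--     """
--     Déduit les colonnes d’un tableau CLI aligné à l’espace à partir de l’en-tête.
--     Retourne une liste [(nom_colonne, start, end)].
--     """
--     cols, n, i, in_col, start = [], len(header_line), 0, False, None
--     while i < n:
--         if not in_col:
--             if header_line[i] != ' ':
--                 in_col, start = True, i
--         else:
--             if header_line[i] == ' ' and i + 1 < n and header_line[i+1] == ' ':
--                 end = i
--                 name = header_line[start:end].strip().lower()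
--                 if name:
--                     cols.append((name, start, end))
--                 while i < n and header_line[i] == ' ':
--                     i += 1
--                 in_col, start = False, None
--                 continue
--         i += 1
--     if in_col and start is not None:
--         name = header_line[start:].strip().lower()
--         if name:
--             cols.append((name, start, n))
--     return cols
-- ===== SOURCE B (Python) =====
-- def _compute_cols(header_line: str):
--     """Gap-driven rewrite: columns are the segments between runs of >= 2 spaces."""
--     cols = []
--     n = len(header_line)
--     pos = 0
--     while True:
--         rel = header_line[pos:].find('  ')
--         if rel == -1:
--             seg = header_line[pos:]
--             name = seg.strip().lower()
--             if name:
--                 start = pos + (len(seg) - len(seg.lstrip(' ')))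
--                 cols.append((name, start, n))
--             return cols
--         j = pos + rel
--         seg = header_line[pos:j]
--         name = seg.strip().lower()
--         if name:
--             start = pos + (len(seg) - len(seg.lstrip(' ')))
--             cols.append((name, start, j))
--         pos = j + 2
-- ===== Notes on version B (the rewrite author's own statement) =====
-- stated objective: simpler
-- what changed: Replaced A's per-character in_col/start state-machine (with inner space-skipping loop and continue) by a gap-driven scan: repeatedly str.find the next run of two spaces and cut the segment before it, deriving each column's name and start offset from the segment with strip/lstrip.
import Mathlib
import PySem

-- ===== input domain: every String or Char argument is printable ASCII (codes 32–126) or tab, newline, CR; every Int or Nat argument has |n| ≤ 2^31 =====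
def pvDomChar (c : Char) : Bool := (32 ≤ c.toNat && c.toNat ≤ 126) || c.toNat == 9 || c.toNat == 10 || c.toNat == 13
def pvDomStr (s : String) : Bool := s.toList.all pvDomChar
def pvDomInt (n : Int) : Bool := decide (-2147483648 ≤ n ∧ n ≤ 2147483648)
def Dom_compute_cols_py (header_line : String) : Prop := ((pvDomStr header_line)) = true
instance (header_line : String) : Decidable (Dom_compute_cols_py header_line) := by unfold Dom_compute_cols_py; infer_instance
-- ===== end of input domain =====

-- B replaces A's per-character in_col/start state machine by a gap-driven scan that finds each
-- run of two-or-more spaces with str.find and cuts the segments between them (objective: simpler).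

-- ===== PORT A =====
-- A's inner loop `while i < n and header_line[i] == ' ': i += 1`, returning the final i
def pvASkip (s : List Char) (i : Nat) : Nat :=
  if _h : i < s.length ∧ s.getD i ' ' = ' ' then pvASkip s (i + 1) else i
termination_by s.length - i
decreasing_by omega

-- needed by pvALoop's termination proof only
theorem pvASkip_ge (s : List Char) (i : Nat) : i ≤ pvASkip s i := by
  unfold pvASkip
  split
  · exact le_trans (by omega) (pvASkip_ge s (i + 1))
  · exact le_rfl
termination_by s.length - i
decreasing_by omega

-- A's main `while i < n` loop.  Python's `start` is None exactly when in_col is False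
-- (loop invariant), so it is ported as a plain Nat holding a dummy 0 while in_col = false.
def pvALoop (s : List Char) (i : Nat) (incol : Bool) (start : Nat)
    (cols : List (String × Int × Int)) : List (String × Int × Int) :=
  if _hi : i < s.length then
    if incol = false then
      if s.getD i ' ' ≠ ' ' then pvALoop s (i + 1) true i cols
      else pvALoop s (i + 1) false start cols
    else
      if s.getD i ' ' = ' ' ∧ i + 1 < s.length ∧ s.getD (i + 1) ' ' = ' ' then
        -- end = i; name = header_line[start:end].strip().lower()
        let name := PySem.Chars.lower (PySem.Chars.strip
          (PySem.List.slice s (some (start : Int)) (some (i : Int))))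
        let cols' := if name ≠ [] then cols ++ [(String.ofList name, (start : Int), (i : Int))]
          else cols
        -- inner skip loop with its first iteration unrolled (header_line[i] = ' ' holds here)
        pvALoop s (pvASkip s (i + 1)) false 0 cols'
      else pvALoop s (i + 1) true start cols
  else
    if incol then
      let name := PySem.Chars.lower (PySem.Chars.strip
        (PySem.List.slice s (some (start : Int)) none))
      if name ≠ [] then cols ++ [(String.ofList name, (start : Int), (s.length : Int))] else cols
    else cols
termination_by s.length - i
decreasing_by
  · omega
  · omega
  · have := pvASkip_ge s (i + 1); omega
  · omega

def compute_cols_py (header_line : String) : List (String × Int × Int) :=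
  pvALoop header_line.toList 0 false 0 []

-- ===== PORT B =====
-- len(seg) - len(seg.lstrip(' ')); lstrip(' ') strips spaces only, ported by hand as dropWhile (exact)
def pvLeadSp (l : List Char) : Nat := l.length - (List.dropWhile (· == ' ') l).length

-- B's `while True` loop: find the next two-space gap, cut the segment before it, jump past it
def pvBLoop (s : List Char) (pos : Nat) (cols : List (String × Int × Int)) :
    List (String × Int × Int) :=
  -- rel = header_line[pos:].find('  ')
  let rel := PySem.Chars.find (PySem.List.slice s (some (pos : Int)) none) [' ', ' ']
  if _hrel : rel = -1 then
    let seg := PySem.List.slice s (some (pos : Int)) none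
    let name := PySem.Chars.lower (PySem.Chars.strip seg)
    if name ≠ [] then
      cols ++ [(String.ofList name, ((pos + pvLeadSp seg : Nat) : Int), (s.length : Int))]
    else cols
  else
    let j := pos + rel.toNat
    let seg := PySem.List.slice s (some (pos : Int)) (some ((j : Nat) : Int))
    let name := PySem.Chars.lower (PySem.Chars.strip seg)
    let cols' := if name ≠ [] then
        cols ++ [(String.ofList name, ((pos + pvLeadSp seg : Nat) : Int), (j : Int))]
      else cols
    pvBLoop s (j + 2) cols'
termination_by s.length + 2 - pos
decreasing_by
  have hsl : PySem.List.slice s (some (pos : Int)) none = List.drop pos s :=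
    PySem.List.slice_from_natCast s pos
  rw [hsl]
  have hrel' : PySem.Chars.find (List.drop pos s) [' ', ' '] ≠ -1 := by
    rw [← hsl]; exact _hrel
  have h0 : (0 : Int) ≤ PySem.Chars.find (List.drop pos s) [' ', ' '] := by
    have := PySem.Chars.neg_one_le_find (List.drop pos s) [' ', ' ']
    omega
  have hspec := PySem.Chars.find_spec (s := List.drop pos s) (sub := [' ', ' ']) h0
  have hlen : (PySem.Chars.find (List.drop pos s) [' ', ' ']).toNat + 2 ≤ s.length - pos := by
    have h2 := hspec.1.length_le
    rw [List.length_drop, List.length_drop] at h2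
    simp only [List.length_cons, List.length_nil] at h2
    omega
  omega

def compute_cols_py_alt (header_line : String) : List (String × Int × Int) :=
  pvBLoop header_line.toList 0 []

-- ===== PRECONDITION & SPEC =====
def Spec_compute_cols_py (header_line : String) (out : List (String × Int × Int)) : Prop := out = compute_cols_py_alt header_line
instance (header_line : String) (out : List (String × Int × Int)) : Decidable (Spec_compute_cols_py header_line out) := by unfold Spec_compute_cols_py; infer_instance

-- ===== CLAIM (what is proved, stated in full; the proofs are below) =====
def Claim_equal_compute_cols_py : Prop := ∀ (header_line : String), Dom_compute_cols_py header_line → Spec_compute_cols_py header_line (compute_cols_py header_line)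

-- ===== LEMMAS AND PROOFS =====

-- a two-character prefix, elementwise
theorem pv_two_prefix_iff (l : List Char) :
    ([' ', ' '] <+: l) ↔ l[0]? = some ' ' ∧ l[1]? = some ' ' := by
  match l with
  | [] => simp
  | [a] => simp [List.prefix_cons_iff]
  | a :: b :: t =>
    constructor
    · rintro ⟨u, hu⟩
      injection hu with h1 h2; injection h2 with h2 _
      simp [← h1, ← h2]
    · rintro ⟨h1, h2⟩
      simp only [List.getElem?_cons_zero, Option.some.injEq] at h1
      simp only [List.getElem?_cons_succ, List.getElem?_cons_zero, Option.some.injEq] at h2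
      exact ⟨t, by simp [h1, h2]⟩

theorem pv_sep_elim {s : List Char} {k : Nat} (h : [' ', ' '] <+: s.drop k) :
    k + 1 < s.length ∧ s.getD k ' ' = ' ' ∧ s.getD (k + 1) ' ' = ' ' := by
  rw [pv_two_prefix_iff] at h
  obtain ⟨h0, h1⟩ := h
  rw [List.getElem?_drop] at h0 h1
  have hk1 : k + 1 < s.length := by
    by_contra hc
    rw [List.getElem?_eq_none (by omega)] at h1
    exact absurd h1 (by simp)
  refine ⟨hk1, ?_, ?_⟩
  · rw [List.getElem?_eq_getElem (by omega)] at h0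
    rw [List.getD_eq_getElem s ' ' (by omega)]
    simpa using h0
  · rw [List.getElem?_eq_getElem (by omega)] at h1
    rw [List.getD_eq_getElem s ' ' (by omega)]
    simpa using h1

theorem pv_sep_intro {s : List Char} {k : Nat} (hk : k + 1 < s.length)
    (h0 : s.getD k ' ' = ' ') (h1 : s.getD (k + 1) ' ' = ' ') :
    [' ', ' '] <+: s.drop k := by
  rw [pv_two_prefix_iff]
  rw [List.getElem?_drop, List.getElem?_drop]
  rw [List.getD_eq_getElem s ' ' (by omega)] at h0
  rw [List.getD_eq_getElem s ' ' (by omega)] at h1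
  constructor
  · rw [List.getElem?_eq_getElem (by omega)]; simpa using h0
  · rw [List.getElem?_eq_getElem (by omega)]; simpa using h1

-- pvASkip: it stops at the first non-space position
theorem pvASkip_le_len {s : List Char} {i : Nat} (h : i ≤ s.length) :
    pvASkip s i ≤ s.length := by
  unfold pvASkip
  split
  · next hc => exact pvASkip_le_len (by omega)
  · exact h
termination_by s.length - i
decreasing_by omega

theorem pvASkip_spaces {s : List Char} {i : Nat} :
    ∀ k, i ≤ k → k < pvASkip s i → s.getD k ' ' = ' ' := by
  intro k hik hk
  by_cases hc : i < s.length ∧ s.getD i ' ' = ' '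
  · rcases Nat.eq_or_lt_of_le hik with rfl | hlt
    · exact hc.2
    · have hstep : pvASkip s i = pvASkip s (i + 1) := by
        conv_lhs => rw [pvASkip]
        rw [dif_pos hc]
      exact pvASkip_spaces k hlt (by rw [← hstep]; exact hk)
  · have hstop : pvASkip s i = i := by
      conv_lhs => rw [pvASkip]
      rw [dif_neg hc]
    omega
termination_by s.length - i
decreasing_by omega

theorem pvASkip_stop {s : List Char} {i : Nat} (h : pvASkip s i < s.length) :
    s.getD (pvASkip s i) ' ' ≠ ' ' := by
  by_cases hc : i < s.length ∧ s.getD i ' ' = ' '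
  · have hstep : pvASkip s i = pvASkip s (i + 1) := by
      conv_lhs => rw [pvASkip]
      rw [dif_pos hc]
    rw [hstep] at h ⊢
    exact pvASkip_stop h
  · have hstop : pvASkip s i = i := by
      conv_lhs => rw [pvASkip]
      rw [dif_neg hc]
    rw [hstop] at h ⊢
    intro hsp
    exact hc ⟨h, hsp⟩
termination_by s.length - i
decreasing_by omega

theorem pvASkip_step {s : List Char} {i : Nat} (h1 : i < s.length)
    (h2 : s.getD i ' ' = ' ') : pvASkip s i = pvASkip s (i + 1) := by
  conv_lhs => rw [pvASkip]
  rw [dif_pos ⟨h1, h2⟩]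

-- strip ignores a prefix of spaces
theorem pv_lstrip_space_prefix {l₁ t : List Char} (h : ∀ c ∈ l₁, c = ' ') :
    PySem.Chars.lstrip (l₁ ++ t) = PySem.Chars.lstrip t := by
  induction l₁ with
  | nil => simp
  | cons c l ih =>
    have hc : c = ' ' := h c (by simp)
    subst hc
    rw [List.cons_append]
    unfold PySem.Chars.lstrip
    rw [List.dropWhile_cons_of_pos (by decide)]
    exact ih (fun c hc => h c (by simp [hc]))

theorem pv_strip_space_prefix {l₁ t : List Char} (h : ∀ c ∈ l₁, c = ' ') :
    PySem.Chars.strip (l₁ ++ t) = PySem.Chars.strip t := by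
  unfold PySem.Chars.strip
  rw [pv_lstrip_space_prefix h]

theorem pv_strip_space_nil {l : List Char} (h : ∀ c ∈ l, c = ' ') :
    PySem.Chars.strip l = [] := by
  have := pv_strip_space_prefix (t := []) h
  simpa using this

-- pvLeadSp of (spaces ++ t) with t not starting with a space
theorem pv_leadSp_eq {l₁ t : List Char} (h : ∀ c ∈ l₁, c = ' ')
    (ht : ∀ c', t.head? = some c' → c' ≠ ' ') : pvLeadSp (l₁ ++ t) = l₁.length := by
  have hdw : List.dropWhile (· == ' ') (l₁ ++ t) = t := by
    induction l₁ with
    | nil =>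
      cases t with
      | nil => rfl
      | cons c t' =>
        have := ht c rfl
        simp only [List.nil_append]
        rw [List.dropWhile_cons_of_neg (by simpa using this)]
    | cons c l ih =>
      have hc : c = ' ' := h c (by simp)
      subst hc
      rw [List.cons_append, List.dropWhile_cons_of_pos (by decide)]
      exact ih (fun c hc => h c (by simp [hc]))
  unfold pvLeadSp
  rw [hdw, List.length_append]
  omega

-- the characters of take (p - i) (drop i s) are all spaces when [i, p) holds only spaces
theorem pv_take_spaces {s : List Char} {i p : Nat}
    (h : ∀ k, i ≤ k → k < p → s.getD k ' ' = ' ') :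
    ∀ c ∈ List.take (p - i) (List.drop i s), c = ' ' := by
  intro c hc
  rw [List.mem_iff_getElem] at hc
  obtain ⟨m, hm, rfl⟩ := hc
  simp only [List.length_take, List.length_drop, lt_min_iff] at hm
  rw [List.getElem_take, List.getElem_drop]
  rw [← List.getD_eq_getElem s ' ' (by omega)]
  exact h (i + m) (by omega) (by omega)

theorem pv_drop_split {s : List Char} {i p : Nat} (h : i ≤ p) :
    List.drop i s = List.take (p - i) (List.drop i s) ++ List.drop p s := by
  have : List.drop p s = List.drop (p - i) (List.drop i s) := by
    rw [List.drop_drop]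
    congr 1
    omega
  rw [this, List.take_append_drop]

-- A's loop walks over spaces without changing state (in_col = false)
theorem pvA_walk {s : List Char} {i q : Nat} (st : Nat) (cols : List (String × Int × Int))
    (hiq : i ≤ q) (hq : q ≤ s.length) (h : ∀ k, i ≤ k → k < q → s.getD k ' ' = ' ') :
    pvALoop s i false st cols = pvALoop s q false st cols := by
  rcases Nat.eq_or_lt_of_le hiq with rfl | hlt
  · rfl
  · have hi : i < s.length := by omega
    have hsp : s.getD i ' ' = ' ' := h i le_rfl hlt
    conv_lhs => rw [pvALoop]
    rw [dif_pos hi]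
    simp only [hsp, ite_not]
    exact pvA_walk st cols (by omega) hq (fun k hk1 hk2 => h k (by omega) hk2)
termination_by q - i
decreasing_by omega

-- A's loop in a column with no separator ahead runs to the final append
theorem pvA_tail {s : List Char} {i : Nat} (st : Nat) (cols : List (String × Int × Int))
    (h : ∀ k, i ≤ k → ¬ ([' ', ' '] <+: s.drop k)) :
    pvALoop s i true st cols =
      (if PySem.Chars.lower (PySem.Chars.strip
            (PySem.List.slice s (some (st : Int)) none)) ≠ [] then
        cols ++ [(String.ofList (PySem.Chars.lower (PySem.Chars.strip
          (PySem.List.slice s (some (st : Int)) none))), (st : Int), (s.length : Int))]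
      else cols) := by
  by_cases hi : i < s.length
  · have hnsep : ¬ (s.getD i ' ' = ' ' ∧ i + 1 < s.length ∧ s.getD (i + 1) ' ' = ' ') := by
      rintro ⟨h0, h1, h2⟩
      exact h i le_rfl (pv_sep_intro h1 h0 h2)
    conv_lhs => rw [pvALoop]
    rw [dif_pos hi]
    simp only [Bool.true_eq_false, if_false, if_neg hnsep]
    exact pvA_tail st cols (fun k hk => h k (by omega))
  · conv_lhs => rw [pvALoop]
    rw [dif_neg hi]
    simp
termination_by s.length - i
decreasing_by omega

-- A's loop in a column scans to the first separator j, appends, and skips the gap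
theorem pvA_scan {s : List Char} {i j : Nat} (st : Nat) (cols : List (String × Int × Int))
    (hij : i ≤ j) (hsep : [' ', ' '] <+: s.drop j)
    (hmin : ∀ k, i ≤ k → k < j → ¬ ([' ', ' '] <+: s.drop k)) :
    pvALoop s i true st cols =
      pvALoop s (pvASkip s (j + 1)) false 0
        (if PySem.Chars.lower (PySem.Chars.strip
              (PySem.List.slice s (some (st : Int)) (some (j : Int)))) ≠ [] then
          cols ++ [(String.ofList (PySem.Chars.lower (PySem.Chars.strip
            (PySem.List.slice s (some (st : Int)) (some (j : Int))))), (st : Int), (j : Int))]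
        else cols) := by
  obtain ⟨hj1, hj0, hj2⟩ := pv_sep_elim hsep
  rcases Nat.eq_or_lt_of_le hij with rfl | hlt
  · conv_lhs => rw [pvALoop]
    rw [dif_pos (by omega)]
    simp only [Bool.true_eq_false, if_false]
    rw [if_pos (⟨hj0, hj1, hj2⟩ :
      s.getD i ' ' = ' ' ∧ i + 1 < s.length ∧ s.getD (i + 1) ' ' = ' ')]
  · have hi : i < s.length := by omega
    have hnsep : ¬ (s.getD i ' ' = ' ' ∧ i + 1 < s.length ∧ s.getD (i + 1) ' ' = ' ') := by
      rintro ⟨h0, h1, h2⟩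
      exact hmin i le_rfl hlt (pv_sep_intro h1 h0 h2)
    conv_lhs => rw [pvALoop]
    rw [dif_pos hi]
    simp only [Bool.true_eq_false, if_false, if_neg hnsep]
    exact pvA_scan st cols (by omega) hsep (fun k hk1 hk2 => hmin k (by omega) hk2)
termination_by j - i
decreasing_by omega

-- one step of A's loop: a non-space while not in a column opens a column
theorem pvA_enter {s : List Char} {i : Nat} (st : Nat) (cols : List (String × Int × Int))
    (hi : i < s.length) (hns : s.getD i ' ' ≠ ' ') :
    pvALoop s i false st cols = pvALoop s (i + 1) true i cols := by
  conv_lhs => rw [pvALoop]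
  rw [dif_pos hi]
  simp only [if_true, ite_not, if_neg hns]

-- A's loop at the end of the line with in_col = false returns cols
theorem pvA_end {s : List Char} {i : Nat} (st : Nat) (cols : List (String × Int × Int))
    (hi : s.length ≤ i) :
    pvALoop s i false st cols = cols := by
  rw [pvALoop]
  rw [dif_neg (by omega)]
  simp

-- drop p s starts with a non-space when pvASkip stops before the end
theorem pv_head_drop {s : List Char} {p : Nat} (hpl : p < s.length)
    (hpns : s.getD p ' ' ≠ ' ') :
    ∀ c', (List.drop p s).head? = some c' → c' ≠ ' ' := by
  intro c' hc'
  rw [List.head?_drop, List.getElem?_eq_getElem hpl] at hc'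
  rw [← List.getD_eq_getElem s ' ' hpl] at hc'
  injection hc' with h
  rw [h] at hpns
  exact hpns

theorem compute_cols_py_main (s : List Char) (pos st : Nat)
    (cols : List (String × Int × Int)) :
    pvALoop s pos false st cols = pvBLoop s pos cols := by
  have hsl : PySem.List.slice s (some (pos : Int)) none = List.drop pos s :=
    PySem.List.slice_from_natCast s pos
  conv_rhs => rw [pvBLoop]
  simp only [hsl]
  have hppos := pvASkip_ge s pos
  by_cases hfind : PySem.Chars.find (List.drop pos s) [' ', ' '] = -1
  · -- no separator at or after pos
    rw [dif_pos hfind]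
    have hnosep : ∀ k, pos ≤ k → ¬ ([' ', ' '] <+: s.drop k) := by
      intro k hk hpre
      have hdd : List.drop k s = List.drop (k - pos) (List.drop pos s) := by
        rw [List.drop_drop]; congr 1; omega
      rw [hdd] at hpre
      have hisin : PySem.Chars.isIn [' ', ' '] (List.drop pos s) = true :=
        (PySem.Chars.exists_prefix_drop_iff_isIn _ _).1 ⟨_, hpre⟩
      exact (PySem.Chars.find_ne_neg_one_iff _ _).2
        ((PySem.Chars.isIn_iff_infix _ _).1 hisin) hfind
    by_cases hpos : pos ≤ s.length
    · have hpn : pvASkip s pos ≤ s.length := pvASkip_le_len hpos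
      by_cases hpl : pvASkip s pos < s.length
      · -- a final column starts at p := pvASkip s pos
        have hpns : s.getD (pvASkip s pos) ' ' ≠ ' ' := pvASkip_stop hpl
        rw [pvA_walk st cols hppos hpn (fun k h1 h2 => pvASkip_spaces k h1 h2)]
        rw [pvA_enter st cols hpl hpns]
        rw [pvA_tail (pvASkip s pos) cols (fun k hk => hnosep k (by omega))]
        rw [PySem.List.slice_from_natCast]
        have hsplit := pv_drop_split (s := s) (i := pos) (p := pvASkip s pos) hppos
        have hsp := pv_take_spaces (s := s) (i := pos) (p := pvASkip s pos)
          (fun k h1 h2 => pvASkip_spaces k h1 h2)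
        have hstrip : PySem.Chars.strip (List.drop pos s) =
            PySem.Chars.strip (List.drop (pvASkip s pos) s) := by
          conv_lhs => rw [hsplit]
          exact pv_strip_space_prefix hsp
        have hlead : pvLeadSp (List.drop pos s) = pvASkip s pos - pos := by
          conv_lhs => rw [hsplit]
          rw [pv_leadSp_eq hsp (pv_head_drop hpl hpns)]
          simp only [List.length_take, List.length_drop]
          omega
        have hcast : ((pos + pvLeadSp (List.drop pos s) : Nat) : Int) =
            ((pvASkip s pos : Nat) : Int) := by
          rw [hlead]; congr 1; omega
        rw [hstrip, hcast]
      · -- only spaces from pos on: no further column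
        have hpeq : pvASkip s pos = s.length := by omega
        have hall : ∀ k, pos ≤ k → k < s.length → s.getD k ' ' = ' ' :=
          fun k h1 h2 => pvASkip_spaces k h1 (by omega)
        rw [pvA_walk st cols hpos le_rfl hall]
        rw [pvA_end st cols le_rfl]
        have hstrip0 : PySem.Chars.strip (List.drop pos s) = [] := by
          apply pv_strip_space_nil
          intro c hc
          apply pv_take_spaces (s := s) (i := pos) (p := s.length) hall
          rw [List.take_of_length_le (by simp)]
          exact hc
        simp [hstrip0, PySem.Chars.lower]
    · -- pos beyond the end: both sides return cols unchanged
      rw [pvA_end st cols (by omega)]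
      have hnil : List.drop pos s = [] := List.drop_of_length_le (by omega)
      simp [hnil, PySem.Chars.lower, pv_strip_space_nil]
  · -- first separator at j := pos + r
    rw [dif_neg hfind]
    have h0 : (0 : Int) ≤ PySem.Chars.find (List.drop pos s) [' ', ' '] := by
      have := PySem.Chars.neg_one_le_find (List.drop pos s) [' ', ' ']
      omega
    have hspec := PySem.Chars.find_spec (s := List.drop pos s) (sub := [' ', ' ']) h0
    set r := (PySem.Chars.find (List.drop pos s) [' ', ' ']).toNat with hr
    have hsepj : [' ', ' '] <+:
        s.drop (pos + r) := by
      have h := hspec.1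
      rw [List.drop_drop] at h
      convert h using 2
    have hmin : ∀ k, pos ≤ k →
        k < pos + r →
        ¬ ([' ', ' '] <+: s.drop k) := by
      intro k h1 h2 hpre
      apply hspec.2 (k - pos) (by omega)
      rw [List.drop_drop]
      convert hpre using 2
      omega
    obtain ⟨hj1, hj0, hj2⟩ := pv_sep_elim hsepj
    rw [PySem.List.slice_natCast]
    have hrj : pos + r - pos =
        r := by omega
    rw [hrj]
    by_cases hpj : pvASkip s pos < pos + r
    · -- a column starts at p before the gap
      have hpl : pvASkip s pos < s.length := by omega
      have hpns : s.getD (pvASkip s pos) ' ' ≠ ' ' := pvASkip_stop hpl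
      rw [pvA_walk st cols hppos (by omega) (fun k h1 h2 => pvASkip_spaces k h1 h2)]
      rw [pvA_enter st cols hpl hpns]
      rw [pvA_scan (pvASkip s pos) cols (by omega) hsepj
        (fun k h1 h2 => hmin k (by omega) h2)]
      rw [pvASkip_step hj1 hj2]
      rw [← pvA_walk 0 _ (pvASkip_ge s _) (pvASkip_le_len (by omega))
        (fun k h1 h2 => pvASkip_spaces k h1 h2)]
      rw [compute_cols_py_main s
        (pos + r + 2) 0 _]
      congr 1
      -- the two appended tuples coincide
      rw [PySem.List.slice_natCast]
      have hsplit := pv_drop_split (s := s) (i := pos) (p := pvASkip s pos) hppos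
      have hsp := pv_take_spaces (s := s) (i := pos) (p := pvASkip s pos)
        (fun k h1 h2 => pvASkip_spaces k h1 h2)
      have hlen1 : (List.take (pvASkip s pos - pos) (List.drop pos s)).length =
          pvASkip s pos - pos := by
        simp only [List.length_take, List.length_drop]
        omega
      have hseg : List.take r
          (List.drop pos s) =
          List.take (pvASkip s pos - pos) (List.drop pos s) ++
          List.take (pos + r -
            pvASkip s pos) (List.drop (pvASkip s pos) s) := by
        conv_lhs => rw [hsplit]
        rw [List.take_append, hlen1]
        congr 1
        · rw [List.take_of_length_le (by omega)]
        · congr 1; omega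
      have hstrip : PySem.Chars.strip
          (List.take r
            (List.drop pos s)) =
          PySem.Chars.strip (List.take (pos +
            r - pvASkip s pos)
            (List.drop (pvASkip s pos) s)) := by
        rw [hseg]
        exact pv_strip_space_prefix hsp
      have hheadt : ∀ c', (List.take (pos +
          r - pvASkip s pos)
          (List.drop (pvASkip s pos) s)).head? = some c' → c' ≠ ' ' := by
        intro c' hc'
        apply pv_head_drop hpl hpns c'
        rw [List.head?_take] at hc'
        split at hc'
        · exact absurd hc' (by simp)
        · exact hc'
      have hlead : pvLeadSp (List.take
          r (List.drop pos s)) =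
          pvASkip s pos - pos := by
        rw [hseg, pv_leadSp_eq hsp hheadt, hlen1]
      have hcast : ((pos + pvLeadSp (List.take
          r (List.drop pos s)) : Nat) :
          Int) = ((pvASkip s pos : Nat) : Int) := by
        rw [hlead]; congr 1; omega
      rw [hstrip, hcast]
    · -- the gap comes before any non-space: nothing to append
      have hall : ∀ k, pos ≤ k →
          k < pos + r + 2 →
          s.getD k ' ' = ' ' := by
        intro k h1 h2
        by_cases hk : k < pos + r
        · exact pvASkip_spaces k h1 (by omega)
        · rcases (by omega :
            k = pos + r ∨
            k = pos + r + 1) with rfl | rfl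
          · exact hj0
          · exact hj2
      rw [pvA_walk st cols (by omega) (by omega) hall]
      rw [compute_cols_py_main s
        (pos + r + 2) st _]
      congr 1
      have hstrip0 : PySem.Chars.strip
          (List.take r
            (List.drop pos s)) = [] := by
        apply pv_strip_space_nil
        intro c hc
        apply pv_take_spaces (s := s) (i := pos)
          (p := pos + r)
          (fun k h1 h2 => pvASkip_spaces k h1 (by omega))
        rw [hrj]
        exact hc
      simp [hstrip0, PySem.Chars.lower]
termination_by s.length - pos
decreasing_by
  · omega
  · omega

-- ===== VERDICT (by name: the statement is the Claim_ definition above) =====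
theorem compute_cols_py_spec : Claim_equal_compute_cols_py := by
  intro header_line _
  unfold Spec_compute_cols_py compute_cols_py compute_cols_py_alt
  exact compute_cols_py_main _ 0 0 []
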